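-- pv_equiv track=rewrite | github.com/datakind/edvise | src/edvise/genai/mapping/shared/pipeline_artifacts.py | parse_uc_catalog_from_volume_path
-- ===== SOURCE A (Python) =====
-- def parse_uc_catalog_from_volume_path(volume_path: str) -> str | None:
--     """Return catalog name from a ``/Volumes/<catalog>/...`` path, or None."""
--     p = volume_path.strip()
--     if not p.startswith("/Volumes/"):
--         return None
--     parts = [x for x in p.split("/") if x]
--     if len(parts) < 2:
--         return None
--     # parts[0] == "Volumes", parts[1] == catalog
--     return parts[1]
-- ===== SOURCE B (Python) =====
-- def parse_uc_catalog_from_volume_path(volume_path):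
--     """Return catalog name from a ``/Volumes/<catalog>/...`` path, or None."""
--     p = volume_path.strip()
--     if not p.startswith("/Volumes/"):
--         return None
--     rest = p[9:].lstrip("/")          # skip any extra slashes after the prefix
--     catalog = rest.split("/", 1)[0]   # first segment only; no full split/filter
--     return catalog if catalog else None
-- ===== Notes on version B (the rewrite author's own statement) =====
-- stated objective: simpler
-- what changed: Instead of splitting the whole path on '/', filtering out all empty components into a list and indexing [1], B slices off the '/Volumes/' prefix, strips the leading run of slashes and takes the first segment directly, never materialising a component list.
import Mathlib
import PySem

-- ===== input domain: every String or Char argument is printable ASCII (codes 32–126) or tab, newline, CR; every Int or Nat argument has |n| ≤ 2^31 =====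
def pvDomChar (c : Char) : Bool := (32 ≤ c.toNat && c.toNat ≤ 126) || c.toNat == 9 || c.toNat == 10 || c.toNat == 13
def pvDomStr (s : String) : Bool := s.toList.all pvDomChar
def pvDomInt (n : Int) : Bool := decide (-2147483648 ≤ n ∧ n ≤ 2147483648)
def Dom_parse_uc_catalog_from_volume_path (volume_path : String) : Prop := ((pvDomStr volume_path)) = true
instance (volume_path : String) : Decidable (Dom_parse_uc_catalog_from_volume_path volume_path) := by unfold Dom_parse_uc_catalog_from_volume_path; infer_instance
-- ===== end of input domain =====

-- B extracts the catalog by slicing off the "/Volumes/" prefix and taking the first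
-- non-empty segment directly, instead of A's split-all / filter / index-[1]; objective: simpler.

-- ===== PORT A =====
-- A: strip, check the "/Volumes/" prefix, split on "/", filter out empty components, index [1].
def parse_uc_catalog_from_volume_path (volume_path : String) : Option String :=
  let p := PySem.Chars.strip volume_path.toList
  if PySem.Chars.startswith p "/Volumes/".toList then
    let parts := (PySem.Chars.splitOn p "/".toList).filter (fun x => x != [])
    if parts.length < 2 then none
    else (PySem.List.pyGet? parts 1).map String.mk
  else none

-- ===== PORT B =====
-- B: strip, check the prefix, then p[9:].lstrip("/") (drop 9, dropWhile '/' — exact for this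
-- nonnegative in-range slice and single strip char) and split("/", 1)[0] (takeWhile ≠ '/', exact).
def parse_uc_catalog_from_volume_path_alt (volume_path : String) : Option String :=
  let p := PySem.Chars.strip volume_path.toList
  if PySem.Chars.startswith p "/Volumes/".toList then
    let rest := (p.drop 9).dropWhile (fun c => c == '/')
    let catalog := rest.takeWhile (fun c => c != '/')
    if catalog = [] then none else some (String.mk catalog)
  else none

-- ===== PRECONDITION & SPEC =====
def Spec_parse_uc_catalog_from_volume_path (volume_path : String) (out : Option String) : Prop := out = parse_uc_catalog_from_volume_path_alt volume_path
instance (volume_path : String) (out : Option String) : Decidable (Spec_parse_uc_catalog_from_volume_path volume_path out) := by unfold Spec_parse_uc_catalog_from_volume_path; infer_instance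

-- ===== CLAIM (what is proved, stated in full; the proofs are below) =====
def Claim_equal_parse_uc_catalog_from_volume_path : Prop := ∀ (volume_path : String), Dom_parse_uc_catalog_from_volume_path volume_path → Spec_parse_uc_catalog_from_volume_path volume_path (parse_uc_catalog_from_volume_path volume_path)

-- ===== LEMMAS AND PROOFS =====

-- closed-form model of PySem.Chars.splitOn.go for the one-character separator '/'
def pvSplitAux (pre : List Char) : List Char → List (List Char)
  | [] => [pre]
  | c :: r => if c = '/' then pre :: pvSplitAux [] r else pvSplitAux (pre ++ [c]) r

theorem pvGo_eq (fuel : Nat) : ∀ (l cur : List Char) (acc : List (List Char)), l.length ≤ fuel →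
    PySem.Chars.splitOn.go ['/'] fuel l cur acc = acc.reverse ++ pvSplitAux cur.reverse l := by
  induction fuel with
  | zero =>
    intro l cur acc h
    have : l = [] := List.eq_nil_of_length_eq_zero (Nat.le_zero.mp h)
    subst this
    simp [PySem.Chars.splitOn.go, pvSplitAux]
  | succ n ih =>
    intro l cur acc h
    cases l with
    | nil => simp [PySem.Chars.splitOn.go, pvSplitAux]
    | cons c r =>
      rw [PySem.Chars.splitOn.go]
      by_cases hc : c = '/'
      · subst hc
        have hp : List.isPrefixOf ['/'] ('/' :: r) = true := by simp [List.isPrefixOf]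
        simp only [hp, if_true, List.length_cons, List.length_nil, List.drop_succ_cons,
          List.drop_zero]
        rw [ih r [] (List.reverse cur :: acc) (by simpa using Nat.lt_succ_iff.mp (by simpa using h))]
        simp [pvSplitAux]
      · have hpf : List.isPrefixOf ['/'] (c :: r) = false := by
          simp [List.isPrefixOf]
          intro hh
          exact absurd hh.symm hc
        simp only [hpf, Bool.false_eq_true, if_false]
        rw [ih r (c :: cur) acc (by simpa using Nat.lt_succ_iff.mp (by simpa using h))]
        simp only [pvSplitAux, if_neg hc, List.reverse_cons]

theorem pvSplitOn_eq (s : List Char) :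
    PySem.Chars.splitOn s ['/'] = pvSplitAux [] s := by
  rw [PySem.Chars.splitOn, pvGo_eq (s.length + 1) s [] [] (Nat.le_succ _)]
  rfl

-- head of the nonempty components of pvSplitAux, in closed form
theorem pvHead_filter (t : List Char) : ∀ (pre : List Char),
    ((pvSplitAux pre t).filter (fun x => x != [])).head? =
      (if pre = [] then
        (if t.dropWhile (fun c => c == '/') = [] then none
         else some ((t.dropWhile (fun c => c == '/')).takeWhile (fun c => c != '/')))
       else some (pre ++ t.takeWhile (fun c => c != '/'))) := by
  induction t with
  | nil =>
    intro pre
    by_cases hp : pre = [] <;> simp [pvSplitAux, hp, List.filter]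
  | cons c r ih =>
    intro pre
    by_cases hc : c = '/'
    · subst hc
      by_cases hp : pre = []
      · subst hp
        simp only [pvSplitAux]
        simpa using ih []
      · simp [pvSplitAux, hp, List.takeWhile]
    · have hb : (c == '/') = false := by simp [hc]
      have h1 := ih (pre ++ [c])
      simp only [pvSplitAux, if_neg hc, h1]
      by_cases hp : pre = [] <;>
        simp [hp, List.takeWhile_cons, hb] <;> exact hc

theorem parse_uc_spec_aux (volume_path : String) :
    parse_uc_catalog_from_volume_path volume_path = parse_uc_catalog_from_volume_path_alt volume_path := by
  unfold parse_uc_catalog_from_volume_path parse_uc_catalog_from_volume_path_alt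
  set p := PySem.Chars.strip volume_path.toList with hp
  by_cases hs : PySem.Chars.startswith p "/Volumes/".toList = true
  · obtain ⟨t, ht⟩ := (PySem.Chars.startswith_iff p "/Volumes/".toList).mp hs
    have hvol : ("/Volumes/" : String).toList = ['/','V','o','l','u','m','e','s','/'] := by decide
    rw [hvol] at ht
    have hsep : ("/" : String).toList = ['/'] := by decide
    simp only [hs, if_true, hsep]
    have hparts : (PySem.Chars.splitOn p ['/']).filter (fun x => x != []) =
        ['V','o','l','u','m','e','s'] :: (pvSplitAux [] t).filter (fun x => x != []) := by
      rw [← ht, pvSplitOn_eq]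
      rfl
    have hdrop : p.drop 9 = t := by rw [← ht]; rfl
    set F := (pvSplitAux [] t).filter (fun x => x != []) with hF
    set d := t.dropWhile (fun c => c == '/') with hd
    have hhead : F.head? = if d = [] then none
        else some (d.takeWhile (fun c => c != '/')) := by
      rw [hF, pvHead_filter t [], if_pos rfl]
    rw [hparts, hdrop]
    by_cases hdn : d = []
    · have hF0 : F = [] := List.head?_eq_none_iff.mp (by rw [hhead, if_pos hdn])
      have hcat : d.takeWhile (fun c => c != '/') = [] := by rw [hdn]; rfl
      rw [hF0, if_pos (by simp), if_pos hcat]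
    · obtain ⟨a, r, har⟩ : ∃ a r, d = a :: r := by
        cases hdc : d with
        | nil => exact absurd hdc hdn
        | cons a r => exact ⟨a, r, rfl⟩
      have har' : List.dropWhile (fun c => c == '/') t = a :: r := hd.symm.trans har
      have hane : (a == '/') = false := by
        have := List.head_dropWhile_not (fun c => c == '/') (l := t) (by simp [har'])
        simpa [har'] using this
      have hcat : d.takeWhile (fun c => c != '/') = a :: r.takeWhile (fun c => c != '/') := by
        rw [har, List.takeWhile_cons]
        simp only [bne, hane, Bool.not_false, if_true]
      obtain ⟨f, F', hFF⟩ : ∃ f F', F = f :: F' := by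
        cases hFc : F with
        | nil => rw [hFc] at hhead; rw [if_neg hdn] at hhead; simp at hhead
        | cons f F' => exact ⟨f, F', rfl⟩
      have hfcat : f = d.takeWhile (fun c => c != '/') := by
        rw [hFF, if_neg hdn] at hhead
        simpa using hhead
      rw [hFF, if_neg (by simp only [List.length_cons]; omega),
        if_neg (by rw [hcat]; exact List.cons_ne_nil _ _)]
      rw [hfcat]
      have hget : PySem.List.pyGet?
          (['V','o','l','u','m','e','s'] :: List.takeWhile (fun c => c != '/') d :: F') 1 =
          some (List.takeWhile (fun c => c != '/') d) := by
        simp [PySem.List.pyGet?, PySem.List.pyIdx?]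
      rw [hget]
      rfl
  · rw [if_neg hs, if_neg hs]

-- ===== VERDICT (by name: the statement is the Claim_ definition above) =====
theorem parse_uc_catalog_from_volume_path_spec : Claim_equal_parse_uc_catalog_from_volume_path := by
  intro volume_path _
  unfold Spec_parse_uc_catalog_from_volume_path
  exact parse_uc_spec_aux volume_path
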